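-- pv_equiv track=rewrite | github.com/pluginsv/factura-electronica-el-salvador | partidas_sv_dte/report/account_move_line_report.py | _get_parent_chain
-- ===== SOURCE A (Python) =====
-- def _get_parent_chain(code, parent_accounts_by_code):
--     chain = []
--     if not code:
--         return chain
--
--     for size in range(1, len(code)):
--         prefix = code[:size]
--         if prefix in parent_accounts_by_code:
--             chain.append(prefix)
--     return chain
-- ===== SOURCE B (Python) =====
-- def _get_parent_chain(code, parent_accounts_by_code):
--     # Scan the existing account codes instead of enumerating prefixes of `code`:
--     # keep every nonempty proper-prefix key, ordered by increasing length.
--     if not code: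
--         return []
--     n = len(code)
--     matches = [p for p in parent_accounts_by_code
--                if 1 <= len(p) < n and code.startswith(p)]
--     return sorted(matches, key=len)
-- ===== Notes on version B (the rewrite author's own statement) =====
-- stated objective: faster
-- what changed: Instead of enumerating every prefix code[:size] and probing the dict (building O(len(code)) slices of total quadratic size), B scans the dict's keys once, keeps the nonempty proper prefixes of code, and sorts them by length to recover the increasing-length order.
import Mathlib
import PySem

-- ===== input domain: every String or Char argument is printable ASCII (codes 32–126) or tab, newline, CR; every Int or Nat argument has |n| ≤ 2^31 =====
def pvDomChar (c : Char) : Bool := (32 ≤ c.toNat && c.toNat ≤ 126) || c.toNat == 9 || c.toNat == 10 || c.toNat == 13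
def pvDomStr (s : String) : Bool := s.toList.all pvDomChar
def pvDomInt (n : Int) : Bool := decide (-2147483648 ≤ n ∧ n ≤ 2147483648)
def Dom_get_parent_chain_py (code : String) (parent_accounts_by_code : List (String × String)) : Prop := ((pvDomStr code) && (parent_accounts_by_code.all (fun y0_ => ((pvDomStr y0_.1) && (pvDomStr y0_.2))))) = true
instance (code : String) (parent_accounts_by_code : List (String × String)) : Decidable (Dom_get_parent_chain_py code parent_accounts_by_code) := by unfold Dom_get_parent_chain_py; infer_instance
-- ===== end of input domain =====

-- B scans the dict's keys for nonempty proper prefixes of `code` and sorts them by length,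
-- instead of enumerating every prefix of `code` and probing the dict (alternative algorithm, same results).


-- ===== PORT A =====
def get_parent_chain_py (code : String) (parent_accounts_by_code : List (String × String)) : List String :=
  -- chain = []; if not code: return chain
  if code = "" then []
  else
    -- for size in range(1, len(code)): prefix = code[:size]; if prefix in dict: chain.append(prefix)
    (PySem.List.pyRange 1 (PySem.Str.len code) 1).foldl
      (fun chain size =>
        let pfx := PySem.Str.slice code none (some size)
        if parent_accounts_by_code.any (fun kv => kv.1 == pfx) then chain ++ [pfx] else chain)
      []

-- ===== PORT B =====
def get_parent_chain_py_alt (code : String) (parent_accounts_by_code : List (String × String)) : List String :=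
  if code = "" then []
  else
    let n := PySem.Str.len code
    -- [p for p in parent_accounts_by_code if 1 <= len(p) < n and code.startswith(p)]
    -- (iterating a Python dict yields its distinct keys in order: dedup of the key column)
    let matched := (PySem.List.dedup (parent_accounts_by_code.map Prod.fst)).filter
      (fun p => decide (1 ≤ PySem.Str.len p ∧ PySem.Str.len p < n) && PySem.Str.startswith code p)
    PySem.List.sorted matched (fun p => PySem.Str.len p) false

-- ===== PRECONDITION & SPEC =====
def Spec_get_parent_chain_py (code : String) (parent_accounts_by_code : List (String × String)) (out : List String) : Prop := out = get_parent_chain_py_alt code parent_accounts_by_code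
instance (code : String) (parent_accounts_by_code : List (String × String)) (out : List String) : Decidable (Spec_get_parent_chain_py code parent_accounts_by_code out) := by unfold Spec_get_parent_chain_py; infer_instance

-- ===== CLAIM (what is proved, stated in full; the proofs are below) =====
def Claim_equal_get_parent_chain_py : Prop := ∀ (code : String) (parent_accounts_by_code : List (String × String)), Dom_get_parent_chain_py code parent_accounts_by_code → Spec_get_parent_chain_py code parent_accounts_by_code (get_parent_chain_py code parent_accounts_by_code)

-- ===== LEMMAS AND PROOFS =====

-- length of the prefix code[:size] for an in-range size
theorem pv_slice_toList (code : String) (size : Int) (h0 : 0 ≤ size) :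
    (PySem.Str.slice code none (some size)).toList = code.toList.take size.toNat := by
  rw [PySem.Str.toList_slice, PySem.Chars.slice_eq_listSlice, PySem.List.slice_to _ h0]

theorem pv_len_slice (code : String) (size : Int) (h0 : 0 ≤ size)
    (hn : size < PySem.Str.len code) :
    PySem.Str.len (PySem.Str.slice code none (some size)) = size := by
  have := pv_slice_toList code size h0
  rw [PySem.Str.len_eq] at *
  rw [this]
  simp only [List.length_take]
  omega

-- the main equality on a nonempty code
theorem pv_main (code : String) (d : List (String × String)) (hc : ¬ code = "") :
    get_parent_chain_py code d = get_parent_chain_py_alt code d := by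
  unfold get_parent_chain_py get_parent_chain_py_alt
  rw [if_neg hc, if_neg hc]
  set n : Int := PySem.Str.len code with hn
  set f : Int → String := fun size => PySem.Str.slice code none (some size) with hf
  set P : Int → Bool := fun size => d.any (fun kv => kv.1 == f size) with hP
  have hfold : (PySem.List.pyRange 1 n 1).foldl
      (fun chain size => if P size then chain ++ [f size] else chain) []
      = ((PySem.List.pyRange 1 n 1).filter P).map f :=
    PySem.List.foldl_append_if P f _ []
  simp only []
  rw [hfold]
  -- now show the sorted form equals the prefix-enumeration form
  set L := ((PySem.List.pyRange 1 n 1).filter P).map f with hL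
  set keys := PySem.List.dedup (d.map Prod.fst) with hkeys
  set q : String → Bool := fun p =>
    decide (1 ≤ PySem.Str.len p ∧ PySem.Str.len p < n) && PySem.Str.startswith code p with hq
  have hlenf : ∀ size : Int, size ∈ PySem.List.pyRange 1 n 1 → PySem.Str.len (f size) = size := by
    intro size hs
    rw [PySem.List.mem_pyRange_one] at hs
    exact pv_len_slice code size (by omega) hs.2
  -- L is strictly increasing in length
  have hpwL : L.Pairwise (fun a b => PySem.Str.len a < PySem.Str.len b) := by
    rw [hL, List.pairwise_map]
    have hr := (PySem.List.pairwise_lt_pyRange_one 1 n).filter (p := P)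
    refine List.Pairwise.imp_of_mem ?_ hr
    intro a b ha hb hab
    rw [hlenf a (List.mem_of_mem_filter ha), hlenf b (List.mem_of_mem_filter hb)]
    exact hab
  -- same members
  have hmem : ∀ p : String, p ∈ L ↔ p ∈ keys.filter q := by
    intro p
    constructor
    · rintro hp
      rw [hL, List.mem_map] at hp
      obtain ⟨size, hs, hfs⟩ := hp
      rw [List.mem_filter] at hs
      obtain ⟨hsr, hsP⟩ := hs
      have hlen : PySem.Str.len p = size := by rw [← hfs]; exact hlenf size hsr
      rw [PySem.List.mem_pyRange_one] at hsr
      rw [List.mem_filter]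
      constructor
      · -- p is a key of d
        rw [hkeys, PySem.List.mem_dedup, List.mem_map]
        rw [hP] at hsP
        simp only [List.any_eq_true, beq_iff_eq] at hsP
        obtain ⟨kv, hkv, hkv1⟩ := hsP
        exact ⟨kv, hkv, by rw [hkv1, hfs]⟩
      · rw [hq]
        simp only [Bool.and_eq_true, decide_eq_true_eq]
        refine ⟨⟨by omega, by omega⟩, ?_⟩
        rw [PySem.Str.startswith_eq, PySem.Chars.startswith_iff, ← hfs,
          pv_slice_toList code size (by omega)]
        exact List.take_prefix _ _
    · intro hp
      rw [List.mem_filter] at hp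
      obtain ⟨hpk, hpq⟩ := hp
      rw [hq] at hpq
      simp only [Bool.and_eq_true, decide_eq_true_eq] at hpq
      obtain ⟨⟨h1, h2⟩, hsw⟩ := hpq
      rw [PySem.Str.startswith_eq, PySem.Chars.startswith_iff] at hsw
      have hfp : f (PySem.Str.len p) = p := by
        apply String.toList_inj.mp
        rw [hf]
        rw [pv_slice_toList code (PySem.Str.len p) (by omega)]
        obtain ⟨t, ht⟩ := hsw
        rw [← ht]
        rw [PySem.Str.len_eq]
        simp
      rw [hL, List.mem_map]
      refine ⟨PySem.Str.len p, ?_, hfp⟩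
      rw [List.mem_filter, PySem.List.mem_pyRange_one]
      refine ⟨⟨h1, h2⟩, ?_⟩
      rw [hP]
      simp only [List.any_eq_true, beq_iff_eq]
      rw [hkeys, PySem.List.mem_dedup, List.mem_map] at hpk
      obtain ⟨kv, hkv, hkv1⟩ := hpk
      exact ⟨kv, hkv, by rw [hkv1, hfp]⟩
  -- L is a permutation of the filtered keys
  have hndL : L.Nodup := by
    refine hpwL.imp ?_
    intro a b hab he
    rw [he] at hab; omega
  have hndM : (keys.filter q).Nodup := (PySem.List.nodup_dedup _).filter _
  have hperm : L.Perm (keys.filter q) := (List.perm_ext_iff_of_nodup hndL hndM).mpr hmem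
  exact (PySem.List.sorted_eq_of_perm_of_pairwise_lt (keys.filter q) L _ hperm hpwL).symm

-- ===== VERDICT (by name: the statement is the Claim_ definition above) =====
theorem get_parent_chain_py_spec : Claim_equal_get_parent_chain_py := by
  intro code d _
  unfold Spec_get_parent_chain_py
  by_cases hc : code = ""
  · subst hc; rfl
  · exact pv_main code d hc
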